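-- pv_equiv track=rewrite | github.com/gomezlucas196/TP_FUNDAMENTOS | p1_obj3_grupo_lucas.py | cifrar_atbash
-- ===== SOURCE A (Python) =====
-- def cifrar_atbash(mensaje):
--
--     resultado = ""
--     for c in mensaje:
--         if 'A' <= c <= 'Z':
--             resultado += chr(ord('Z') - (ord(c) - ord('A')))
--         elif 'a' <= c <= 'z':
--             resultado += chr(ord('z') - (ord(c) - ord('a')))
--         elif '0' <= c <= '9':
--             resultado += chr(ord('9') - (ord(c) - ord('0')))
--         else:
--             resultado += c
--     return resultado
-- ===== SOURCE B (Python) =====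
-- def _atbash_table():
--     table = {}
--     for lo, hi in (('A', 'Z'), ('a', 'z'), ('0', '9')):
--         for k in range(ord(lo), ord(hi) + 1):
--             table[k] = ord(hi) - (k - ord(lo))
--     return table
--
-- _TABLE = str.maketrans(_atbash_table())
--
-- def cifrar_atbash(mensaje):
--     return mensaje.translate(_TABLE)
-- ===== Notes on version B (the rewrite author's own statement) =====
-- stated objective: idiomatic
-- what changed: Replaces the per-character if/elif branching and string accumulation with a precomputed str.maketrans translation table applied via a single str.translate call.
import Mathlib
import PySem

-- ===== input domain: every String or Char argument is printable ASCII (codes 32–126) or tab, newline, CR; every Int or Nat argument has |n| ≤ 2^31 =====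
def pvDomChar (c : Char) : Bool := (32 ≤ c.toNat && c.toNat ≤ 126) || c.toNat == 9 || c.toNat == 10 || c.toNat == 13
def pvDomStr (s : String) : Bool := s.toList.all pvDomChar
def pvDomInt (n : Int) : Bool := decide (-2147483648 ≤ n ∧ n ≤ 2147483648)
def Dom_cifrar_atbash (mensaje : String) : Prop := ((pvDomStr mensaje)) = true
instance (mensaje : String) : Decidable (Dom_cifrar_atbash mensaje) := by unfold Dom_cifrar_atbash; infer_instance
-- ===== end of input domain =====

-- B replaces A's per-character if/elif chain and string accumulation with a precomputed
-- translation table applied in one pass (idiomatic str.translate); same O(n) cost.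


-- ===== PORT A =====
-- literal port of A's loop: accumulate characters, branching on the three ranges
def cifrar_atbash (mensaje : String) : String :=
  String.mk (mensaje.toList.foldl (fun resultado c =>
    if 'A' ≤ c ∧ c ≤ 'Z' then resultado ++ [Char.ofNat ('Z'.toNat - (c.toNat - 'A'.toNat))]
    else if 'a' ≤ c ∧ c ≤ 'z' then resultado ++ [Char.ofNat ('z'.toNat - (c.toNat - 'a'.toNat))]
    else if '0' ≤ c ∧ c ≤ '9' then resultado ++ [Char.ofNat ('9'.toNat - (c.toNat - '0'.toNat))]
    else resultado ++ [c]) [])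

-- ===== PORT B =====
-- the translation table of Source B: dict from char code to atbash char code, built once
def atbashTable : PySem.Dict Int Int :=
  ([('A', 'Z'), ('a', 'z'), ('0', '9')] : List (Char × Char)).foldl
    (fun table p =>
      (PySem.List.pyRange (p.1.toNat : Int) ((p.2.toNat : Int) + 1) 1).foldl
        (fun table k => table.insert k ((p.2.toNat : Int) - (k - (p.1.toNat : Int)))) table)
    PySem.Dict.empty

-- mensaje.translate(_TABLE): each char is mapped through the table, unmapped chars unchanged
def cifrar_atbash_alt (mensaje : String) : String :=
  String.mk (mensaje.toList.map (fun c =>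
    match atbashTable.get? (c.toNat : Int) with
    | some v => Char.ofNat v.toNat
    | none => c))

-- ===== PRECONDITION & SPEC =====
def Spec_cifrar_atbash (mensaje : String) (out : String) : Prop := out = cifrar_atbash_alt mensaje
instance (mensaje : String) (out : String) : Decidable (Spec_cifrar_atbash mensaje out) := by unfold Spec_cifrar_atbash; infer_instance

-- ===== CLAIM (what is proved, stated in full; the proofs are below) =====
def Claim_equal_cifrar_atbash : Prop := ∀ (mensaje : String), Dom_cifrar_atbash mensaje → Spec_cifrar_atbash mensaje (cifrar_atbash mensaje)

-- ===== LEMMAS AND PROOFS =====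

-- A's loop body as a per-character function
def stepA (c : Char) : Char :=
  if 'A' ≤ c ∧ c ≤ 'Z' then Char.ofNat ('Z'.toNat - (c.toNat - 'A'.toNat))
  else if 'a' ≤ c ∧ c ≤ 'z' then Char.ofNat ('z'.toNat - (c.toNat - 'a'.toNat))
  else if '0' ≤ c ∧ c ≤ '9' then Char.ofNat ('9'.toNat - (c.toNat - '0'.toNat))
  else c

-- B's per-character translation
def stepB (c : Char) : Char :=
  match atbashTable.get? (c.toNat : Int) with
  | some v => Char.ofNat v.toNat
  | none => c

lemma foldl_stepA (l : List Char) (acc : List Char) :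
    l.foldl (fun resultado c =>
      if 'A' ≤ c ∧ c ≤ 'Z' then resultado ++ [Char.ofNat ('Z'.toNat - (c.toNat - 'A'.toNat))]
      else if 'a' ≤ c ∧ c ≤ 'z' then resultado ++ [Char.ofNat ('z'.toNat - (c.toNat - 'a'.toNat))]
      else if '0' ≤ c ∧ c ≤ '9' then resultado ++ [Char.ofNat ('9'.toNat - (c.toNat - '0'.toNat))]
      else resultado ++ [c]) acc = acc ++ l.map stepA := by
  induction l generalizing acc with
  | nil => simp
  | cons c t ih =>
      simp only [List.foldl_cons, List.map_cons, ih, stepA]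
      split_ifs <;> simp

-- per-character agreement, checked over all 127 low char codes
set_option maxRecDepth 10000 in
lemma step_eq_fin : ∀ n : Fin 127, stepA (Char.ofNat n.val) = stepB (Char.ofNat n.val) := by decide

lemma step_eq (c : Char) (h : c.toNat ≤ 126) : stepA c = stepB c := by
  have := step_eq_fin ⟨c.toNat, by omega⟩
  simpa [Char.ofNat_toNat] using this

-- ===== VERDICT (by name: the statement is the Claim_ definition above) =====
set_option maxRecDepth 10000 in
theorem cifrar_atbash_spec : Claim_equal_cifrar_atbash := by
  intro mensaje hdom
  unfold Spec_cifrar_atbash cifrar_atbash cifrar_atbash_alt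
  rw [foldl_stepA]
  simp only [List.nil_append]
  congr 1
  apply List.map_congr_left
  intro c hc
  have hpd : pvDomChar c = true := by
    have := (List.all_eq_true.mp hdom) c hc
    simpa using this
  have hle : c.toNat ≤ 126 := by
    simp [pvDomChar] at hpd
    omega
  rw [step_eq c hle]; rfl
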